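-- pv_equiv track=rewrite | github.com/JoeCorrell/TraderOverhaul | Release/generate.py | get_item_category
-- ===== SOURCE A (Python) =====
-- def get_item_category(prefab: str, item_type: str) -> str:
--     """Determine item category for pricing multiplier."""
--     prefab_lower = prefab.lower()
--     type_lower = item_type.lower() if item_type else ''
--
--     # Boss trophies
--     if prefab.startswith('Trophy') and any(b in prefab for b in ['Eikthyr', 'TheElder', 'Bonemass', 'DragonQueen', 'GoblinKing', 'SeekerQueen', 'Fader']):
--         return 'trophy_boss'
--
--     # Keys
--     if 'key' in prefab_lower or prefab in ['CryptKey', 'DvergrKey']: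
--         return 'key'
--
--     # Boss drops
--     if prefab in ['HardAntler', 'CryptKey', 'Wishbone', 'DragonTear', 'YagluthDrop', 'QueenDrop', 'FaderDrop']:
--         return 'material_boss'
--
--     # Eggs (summoning/taming)
--     if 'egg' in prefab_lower:
--         return 'egg'
--
--     # Staves
--     if prefab.startswith('Staff'):
--         return 'staff'
--
--     # Crossbows
--     if 'crossbow' in prefab_lower:
--         return 'crossbow'
--
--     # Bows
--     if prefab.startswith('Bow') or 'bow' in type_lower:
--         return 'bow'
--
--     # Two-handed weapons
--     if prefab.startswith('Battleaxe') or prefab.startswith('Sledge') or prefab.startswith('THSword') or 'atgeir' in prefab_lower: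
--         return 'weapon_2h'
--
--     # Shields
--     if prefab.startswith('Shield'):
--         return 'shield'
--
--     # Tools
--     if any(t in prefab for t in ['Pickaxe', 'Cultivator', 'Hammer', 'Hoe', 'FishingRod']):
--         return 'tool'
--
--     # Capes
--     if prefab.startswith('Cape'):
--         return 'cape'
--
--     # Armor detection
--     if prefab.startswith('Armor') or prefab.startswith('Helmet'):
--         if any(h in prefab for h in ['Padded', 'Iron', 'Bronze', 'Carapace', 'Flametal']):
--             return 'armor_heavy'
--         return 'armor_light'
--
--     # Ammo
--     if prefab.startswith('Arrow') or prefab.startswith('Bolt'):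
--         return 'ammo'
--
--     # Meads
--     if prefab.startswith('Mead'):
--         return 'food_mead'
--
--     # Cooked food
--     if prefab.startswith('Cooked') or any(f in prefab for f in ['Stew', 'Soup', 'Pie', 'Jam', 'Jerky', 'Sausages', 'Pudding', 'Wrap', 'Omelette', 'Porridge']):
--         return 'food_cooked'
--
--     # Raw food
--     if any(f in prefab for f in ['Meat', 'Mushroom', 'Berry', 'Carrot', 'Turnip', 'Onion', 'Barley', 'Honey', 'Fish']):
--         return 'food_raw'
--
--     # Trophies
--     if prefab.startswith('Trophy'):
--         if any(r in prefab for r in ['Brute', 'Elite', 'Shaman', 'Troll', 'Serpent', 'Golem', 'Abomination', 'Gjall', 'Lox', 'Growth', 'Morgen', 'Valkyrie']):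
--             return 'trophy_rare'
--         return 'trophy_common'
--
--     # Rare materials
--     if prefab in ['Chain', 'SurtlingCore', 'Ectoplasm', 'Wisp', 'BlackCore', 'Eitr', 'RoyalJelly', 'Thunderstone']:
--         return 'material_rare'
--
--     # Cosmetic
--     if any(c in prefab for c in ['Dress', 'Tunic', 'Harvester', 'StrawHat', 'Yule']):
--         return 'cosmetic'
--
--     # Treasure (sell only items)
--     if prefab in ['Amber', 'AmberPearl', 'Ruby', 'Coins', 'SilverNecklace', 'GoldRuby']:
--         return 'treasure'
--
--     # One-handed weapons (default for weapon-like items)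
--     if any(w in prefab for w in ['Sword', 'Mace', 'Axe', 'Knife', 'Spear', 'Club']):
--         return 'weapon_1h'
--
--     # Default to common material
--     return 'material_common'
-- ===== SOURCE B (Python) =====
-- # Data-driven rule table: each rule is (groups, (cond_atoms, cat_if, cat_else)).
-- # The condition is an AND over groups, each group an OR over atoms (kind, pattern);
-- # when it fires, return cat_if if any cond_atom matches else cat_else
-- # (a plain-category rule carries an empty cond_atoms list, so cat_else is returned).
--
-- def _g(kind, *pats):
--     return [(kind, p) for p in pats]
--
-- _RULES = [
--     ([_g('pre', 'Trophy'),
--       _g('sub', 'Eikthyr', 'TheElder', 'Bonemass', 'DragonQueen', 'GoblinKing', 'SeekerQueen', 'Fader')],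
--      ([], '', 'trophy_boss')),
--     ([_g('slow', 'key') + _g('eq', 'CryptKey', 'DvergrKey')], ([], '', 'key')),
--     ([_g('eq', 'HardAntler', 'CryptKey', 'Wishbone', 'DragonTear', 'YagluthDrop', 'QueenDrop', 'FaderDrop')],
--      ([], '', 'material_boss')),
--     ([_g('slow', 'egg')], ([], '', 'egg')),
--     ([_g('pre', 'Staff')], ([], '', 'staff')),
--     ([_g('slow', 'crossbow')], ([], '', 'crossbow')),
--     ([_g('pre', 'Bow') + _g('tlow', 'bow')], ([], '', 'bow')),
--     ([_g('pre', 'Battleaxe', 'Sledge', 'THSword') + _g('slow', 'atgeir')], ([], '', 'weapon_2h')),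
--     ([_g('pre', 'Shield')], ([], '', 'shield')),
--     ([_g('sub', 'Pickaxe', 'Cultivator', 'Hammer', 'Hoe', 'FishingRod')], ([], '', 'tool')),
--     ([_g('pre', 'Cape')], ([], '', 'cape')),
--     ([_g('pre', 'Armor', 'Helmet')],
--      (_g('sub', 'Padded', 'Iron', 'Bronze', 'Carapace', 'Flametal'), 'armor_heavy', 'armor_light')),
--     ([_g('pre', 'Arrow', 'Bolt')], ([], '', 'ammo')),
--     ([_g('pre', 'Mead')], ([], '', 'food_mead')),
--     ([_g('pre', 'Cooked') + _g('sub', 'Stew', 'Soup', 'Pie', 'Jam', 'Jerky', 'Sausages', 'Pudding', 'Wrap', 'Omelette', 'Porridge')],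
--      ([], '', 'food_cooked')),
--     ([_g('sub', 'Meat', 'Mushroom', 'Berry', 'Carrot', 'Turnip', 'Onion', 'Barley', 'Honey', 'Fish')],
--      ([], '', 'food_raw')),
--     ([_g('pre', 'Trophy')],
--      (_g('sub', 'Brute', 'Elite', 'Shaman', 'Troll', 'Serpent', 'Golem', 'Abomination', 'Gjall', 'Lox', 'Growth', 'Morgen', 'Valkyrie'),
--       'trophy_rare', 'trophy_common')),
--     ([_g('eq', 'Chain', 'SurtlingCore', 'Ectoplasm', 'Wisp', 'BlackCore', 'Eitr', 'RoyalJelly', 'Thunderstone')],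
--      ([], '', 'material_rare')),
--     ([_g('sub', 'Dress', 'Tunic', 'Harvester', 'StrawHat', 'Yule')], ([], '', 'cosmetic')),
--     ([_g('eq', 'Amber', 'AmberPearl', 'Ruby', 'Coins', 'SilverNecklace', 'GoldRuby')], ([], '', 'treasure')),
--     ([_g('sub', 'Sword', 'Mace', 'Axe', 'Knife', 'Spear', 'Club')], ([], '', 'weapon_1h')),
-- ]
--
--
-- def get_item_category(prefab: str, item_type: str) -> str:
--     prefab_lower = prefab.lower()
--     type_lower = item_type.lower()
--
--     def atom(kind, pat):
--         if kind == 'pre':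
--             return prefab.startswith(pat)
--         if kind == 'sub':
--             return pat in prefab
--         if kind == 'slow':
--             return pat in prefab_lower
--         if kind == 'eq':
--             return prefab == pat
--         return pat in type_lower  # 'tlow'
--
--     for groups, (cond_atoms, cat_if, cat_else) in _RULES:
--         if all(any(atom(k, p) for k, p in g) for g in groups):
--             if any(atom(k, p) for k, p in cond_atoms):
--                 return cat_if
--             return cat_else
--     return 'material_common'
-- ===== Notes on version B (the rewrite author's own statement) =====
-- stated objective: alternative
-- what changed: Replaced the 21-branch if-cascade by a data-driven rule table (AND-of-OR groups of (kind, pattern) atoms with a conditional-category payload) evaluated by one generic first-match loop.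
import Mathlib
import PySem

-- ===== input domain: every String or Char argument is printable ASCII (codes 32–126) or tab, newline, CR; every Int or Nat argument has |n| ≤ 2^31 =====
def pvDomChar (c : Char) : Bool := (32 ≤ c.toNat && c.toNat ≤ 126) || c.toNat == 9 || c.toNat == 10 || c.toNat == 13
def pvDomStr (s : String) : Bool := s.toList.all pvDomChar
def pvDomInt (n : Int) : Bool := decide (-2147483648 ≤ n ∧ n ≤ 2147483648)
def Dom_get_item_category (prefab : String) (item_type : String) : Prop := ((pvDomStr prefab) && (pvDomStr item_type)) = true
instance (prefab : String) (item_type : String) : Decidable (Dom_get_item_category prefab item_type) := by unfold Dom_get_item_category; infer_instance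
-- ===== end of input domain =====

-- B replaces A's 21-branch if-cascade by a data-driven rule table (AND-of-OR atom groups
-- evaluated by one generic matcher); objective: alternative decomposition, same cost.

-- ===== PORT A =====
-- literal transliteration of A's if-cascade
def get_item_category (prefab : String) (item_type : String) : String :=
  let prefab_lower := PySem.Str.lower prefab
  let type_lower := if item_type == "" then "" else PySem.Str.lower item_type
  if PySem.Str.startswith prefab "Trophy" &&
     (["Eikthyr", "TheElder", "Bonemass", "DragonQueen", "GoblinKing", "SeekerQueen", "Fader"].any
        (fun b => PySem.Str.isIn b prefab)) then "trophy_boss"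
  else if PySem.Str.isIn "key" prefab_lower || ["CryptKey", "DvergrKey"].contains prefab then "key"
  else if ["HardAntler", "CryptKey", "Wishbone", "DragonTear", "YagluthDrop", "QueenDrop", "FaderDrop"].contains prefab then "material_boss"
  else if PySem.Str.isIn "egg" prefab_lower then "egg"
  else if PySem.Str.startswith prefab "Staff" then "staff"
  else if PySem.Str.isIn "crossbow" prefab_lower then "crossbow"
  else if PySem.Str.startswith prefab "Bow" || PySem.Str.isIn "bow" type_lower then "bow"
  else if PySem.Str.startswith prefab "Battleaxe" || PySem.Str.startswith prefab "Sledge" ||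
          PySem.Str.startswith prefab "THSword" || PySem.Str.isIn "atgeir" prefab_lower then "weapon_2h"
  else if PySem.Str.startswith prefab "Shield" then "shield"
  else if ["Pickaxe", "Cultivator", "Hammer", "Hoe", "FishingRod"].any (fun t => PySem.Str.isIn t prefab) then "tool"
  else if PySem.Str.startswith prefab "Cape" then "cape"
  else if PySem.Str.startswith prefab "Armor" || PySem.Str.startswith prefab "Helmet" then
    (if ["Padded", "Iron", "Bronze", "Carapace", "Flametal"].any (fun h => PySem.Str.isIn h prefab)
     then "armor_heavy" else "armor_light")
  else if PySem.Str.startswith prefab "Arrow" || PySem.Str.startswith prefab "Bolt" then "ammo"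
  else if PySem.Str.startswith prefab "Mead" then "food_mead"
  else if PySem.Str.startswith prefab "Cooked" ||
          ["Stew", "Soup", "Pie", "Jam", "Jerky", "Sausages", "Pudding", "Wrap", "Omelette", "Porridge"].any
            (fun f => PySem.Str.isIn f prefab) then "food_cooked"
  else if ["Meat", "Mushroom", "Berry", "Carrot", "Turnip", "Onion", "Barley", "Honey", "Fish"].any
            (fun f => PySem.Str.isIn f prefab) then "food_raw"
  else if PySem.Str.startswith prefab "Trophy" then
    (if ["Brute", "Elite", "Shaman", "Troll", "Serpent", "Golem", "Abomination", "Gjall", "Lox", "Growth", "Morgen", "Valkyrie"].any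
          (fun r => PySem.Str.isIn r prefab) then "trophy_rare" else "trophy_common")
  else if ["Chain", "SurtlingCore", "Ectoplasm", "Wisp", "BlackCore", "Eitr", "RoyalJelly", "Thunderstone"].contains prefab then "material_rare"
  else if ["Dress", "Tunic", "Harvester", "StrawHat", "Yule"].any (fun c => PySem.Str.isIn c prefab) then "cosmetic"
  else if ["Amber", "AmberPearl", "Ruby", "Coins", "SilverNecklace", "GoldRuby"].contains prefab then "treasure"
  else if ["Sword", "Mace", "Axe", "Knife", "Spear", "Club"].any (fun w => PySem.Str.isIn w prefab) then "weapon_1h"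
  else "material_common"

-- ===== PORT B =====
-- an atom (kind, pat) tested against (prefab, prefab_lower, type_lower)
def gicAtom (prefab prefab_lower type_lower : String) (a : String × String) : Bool :=
  if a.1 == "pre" then PySem.Str.startswith prefab a.2
  else if a.1 == "sub" then PySem.Str.isIn a.2 prefab
  else if a.1 == "slow" then PySem.Str.isIn a.2 prefab_lower
  else if a.1 == "eq" then prefab == a.2
  else PySem.Str.isIn a.2 type_lower  -- "tlow"

-- _g(kind, *pats)
def gicG (kind : String) (pats : List String) : List (String × String) :=
  pats.map (fun p => (kind, p))

-- _RULES: (groups, (cond_atoms, cat_if, cat_else))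
def gicRules : List (List (List (String × String)) × (List (String × String) × String × String)) :=
  [ ([gicG "pre" ["Trophy"],
      gicG "sub" ["Eikthyr", "TheElder", "Bonemass", "DragonQueen", "GoblinKing", "SeekerQueen", "Fader"]],
     ([], "", "trophy_boss")),
    ([gicG "slow" ["key"] ++ gicG "eq" ["CryptKey", "DvergrKey"]], ([], "", "key")),
    ([gicG "eq" ["HardAntler", "CryptKey", "Wishbone", "DragonTear", "YagluthDrop", "QueenDrop", "FaderDrop"]],
     ([], "", "material_boss")),
    ([gicG "slow" ["egg"]], ([], "", "egg")),
    ([gicG "pre" ["Staff"]], ([], "", "staff")),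
    ([gicG "slow" ["crossbow"]], ([], "", "crossbow")),
    ([gicG "pre" ["Bow"] ++ gicG "tlow" ["bow"]], ([], "", "bow")),
    ([gicG "pre" ["Battleaxe", "Sledge", "THSword"] ++ gicG "slow" ["atgeir"]], ([], "", "weapon_2h")),
    ([gicG "pre" ["Shield"]], ([], "", "shield")),
    ([gicG "sub" ["Pickaxe", "Cultivator", "Hammer", "Hoe", "FishingRod"]], ([], "", "tool")),
    ([gicG "pre" ["Cape"]], ([], "", "cape")),
    ([gicG "pre" ["Armor", "Helmet"]],
     (gicG "sub" ["Padded", "Iron", "Bronze", "Carapace", "Flametal"], "armor_heavy", "armor_light")),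
    ([gicG "pre" ["Arrow", "Bolt"]], ([], "", "ammo")),
    ([gicG "pre" ["Mead"]], ([], "", "food_mead")),
    ([gicG "pre" ["Cooked"] ++ gicG "sub" ["Stew", "Soup", "Pie", "Jam", "Jerky", "Sausages", "Pudding", "Wrap", "Omelette", "Porridge"]],
     ([], "", "food_cooked")),
    ([gicG "sub" ["Meat", "Mushroom", "Berry", "Carrot", "Turnip", "Onion", "Barley", "Honey", "Fish"]],
     ([], "", "food_raw")),
    ([gicG "pre" ["Trophy"]],
     (gicG "sub" ["Brute", "Elite", "Shaman", "Troll", "Serpent", "Golem", "Abomination", "Gjall", "Lox", "Growth", "Morgen", "Valkyrie"],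
      "trophy_rare", "trophy_common")),
    ([gicG "eq" ["Chain", "SurtlingCore", "Ectoplasm", "Wisp", "BlackCore", "Eitr", "RoyalJelly", "Thunderstone"]],
     ([], "", "material_rare")),
    ([gicG "sub" ["Dress", "Tunic", "Harvester", "StrawHat", "Yule"]], ([], "", "cosmetic")),
    ([gicG "eq" ["Amber", "AmberPearl", "Ruby", "Coins", "SilverNecklace", "GoldRuby"]], ([], "", "treasure")),
    ([gicG "sub" ["Sword", "Mace", "Axe", "Knife", "Spear", "Club"]], ([], "", "weapon_1h")) ]

-- the for-loop over _RULES with its fall-through default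
def gicRun (prefab prefab_lower type_lower : String) :
    List (List (List (String × String)) × (List (String × String) × String × String)) → String
  | [] => "material_common"
  | (groups, (cond_atoms, cat_if, cat_else)) :: rest =>
    if groups.all (fun g => g.any (gicAtom prefab prefab_lower type_lower)) then
      (if cond_atoms.any (gicAtom prefab prefab_lower type_lower) then cat_if else cat_else)
    else gicRun prefab prefab_lower type_lower rest

def get_item_category_alt (prefab : String) (item_type : String) : String :=
  gicRun prefab (PySem.Str.lower prefab) (PySem.Str.lower item_type) gicRules

-- ===== PRECONDITION & SPEC =====
def Spec_get_item_category (prefab : String) (item_type : String) (out : String) : Prop := out = get_item_category_alt prefab item_type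
instance (prefab : String) (item_type : String) (out : String) : Decidable (Spec_get_item_category prefab item_type out) := by unfold Spec_get_item_category; infer_instance

-- ===== CLAIM (what is proved, stated in full; the proofs are below) =====
def Claim_equal_get_item_category : Prop := ∀ (prefab : String) (item_type : String), Dom_get_item_category prefab item_type → Spec_get_item_category prefab item_type (get_item_category prefab item_type)

-- ===== LEMMAS AND PROOFS =====
theorem gic_lower_empty : PySem.Str.lower "" = "" := by decide

-- ===== VERDICT (by name: the statement is the Claim_ definition above) =====
theorem get_item_category_spec : Claim_equal_get_item_category := by
  intro prefab item_type _
  unfold Spec_get_item_category get_item_category get_item_category_alt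
  by_cases h : item_type = ""
  · subst h
    simp [gicRules, gicRun, gicAtom, gicG, gic_lower_empty, or_assoc]
  · simp [gicRules, gicRun, gicAtom, gicG, h, or_assoc]
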